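-- pv_equiv track=rewrite | github.com/Julesc013/aide | core/harness/generated_artifacts.py | parse_manifest_targets
-- ===== SOURCE A (Python) =====
-- def parse_manifest_targets(text: str) -> dict[str, dict[str, str]]:
--     targets: dict[str, dict[str, str]] = {}
--     current: dict[str, str] | None = None
--     for raw_line in text.splitlines():
--         line = raw_line.rstrip()
--         stripped = line.strip()
--         if stripped.startswith("- path:"):
--             path = stripped.split(":", 1)[1].strip()
--             current = {"path": path}
--             targets[path] = current
--             continue
--         if current is None or not stripped or stripped.startswith("- "):
--             continue
--         if ":" in stripped:
--             key, value = stripped.split(":", 1)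
--             current[key.strip()] = value.strip()
--     return targets
-- ===== SOURCE B (Python) =====
-- def parse_manifest_targets(text: str) -> dict[str, dict[str, str]]:
--     # Pass 1: cut the stripped lines into blocks, one per '- path:' header.
--     stripped = [line.strip() for line in text.splitlines()]
--     blocks: list[list[str]] = []
--     for s in stripped:
--         if s.startswith("- path:"):
--             blocks.append([s])
--         elif blocks:
--             blocks[-1].append(s)
--     # Pass 2: turn each block into its entry dict; later duplicate paths overwrite.
--     targets: dict[str, dict[str, str]] = {}
--     for block in blocks:
--         path = block[0].split(":", 1)[1].strip()
--         entry = {"path": path}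
--         for s in block[1:]:
--             if s and not s.startswith("- ") and ":" in s:
--                 key, value = s.split(":", 1)
--                 entry[key.strip()] = value.strip()
--         targets[path] = entry
--     return targets
-- ===== Notes on version B (the rewrite author's own statement) =====
-- stated objective: alternative
-- what changed: A is a single stateful line loop that aliases the in-progress entry dict into the result and mutates it in place; B first cuts the stripped lines into path-header blocks and then maps each block to its entry dict, inserting once per block.
import Mathlib
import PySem

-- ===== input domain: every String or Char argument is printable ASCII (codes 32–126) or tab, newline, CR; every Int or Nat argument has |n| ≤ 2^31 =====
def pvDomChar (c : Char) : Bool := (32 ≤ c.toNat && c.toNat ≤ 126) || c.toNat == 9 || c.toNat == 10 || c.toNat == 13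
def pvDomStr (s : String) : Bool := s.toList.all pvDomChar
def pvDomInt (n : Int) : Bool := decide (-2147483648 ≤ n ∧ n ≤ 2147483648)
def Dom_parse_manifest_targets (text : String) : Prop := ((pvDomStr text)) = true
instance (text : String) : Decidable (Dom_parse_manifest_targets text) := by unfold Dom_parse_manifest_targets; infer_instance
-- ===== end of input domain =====

-- B replaces A's single stateful line loop (a `current` dict aliased into the result) by a
-- two-pass decomposition: cut the stripped lines into '- path:' blocks, then map each block
-- to its entry dict and insert it (objective: alternative decomposition, same cost).

-- ===== PORT A =====
-- loop body of A's `for raw_line in text.splitlines()` (state = (targets, current path));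
-- Python's `current` is always the dict stored at `targets[path]`, so mutating `current`
-- is `targets.modify path` (exact: `targets[path] = current` rebinds both together).
def pvA_step (st : PySem.Dict String (PySem.Dict String String) × Option String)
    (raw_line : String) : PySem.Dict String (PySem.Dict String String) × Option String :=
  let line := PySem.Str.rstrip raw_line
  let stripped := PySem.Str.strip line
  if PySem.Str.startswith stripped "- path:" then
    let path := PySem.Str.strip ((((PySem.Str.splitMax? stripped ":" 1).getD []).getD 1 ""))
    (st.1.insert path (PySem.Dict.empty.insert "path" path), some path)
  else if st.2.isNone || stripped == "" || PySem.Str.startswith stripped "- " then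
    st
  else if PySem.Str.isIn ":" stripped then
    match st.2 with
    | some p =>
        let parts := (PySem.Str.splitMax? stripped ":" 1).getD []
        (st.1.modify p PySem.Dict.empty
          (fun cur => cur.insert (PySem.Str.strip (parts.getD 0 "")) (PySem.Str.strip (parts.getD 1 ""))),
         st.2)
    | none => st   -- unreachable: guarded by st.2.isNone above
  else st

def parse_manifest_targets (text : String) : List (String × List (String × String)) :=
  let res := (PySem.Str.splitlines text).foldl pvA_step (PySem.Dict.empty, none)
  res.1.items.map (fun kv => (kv.1, kv.2.items))

-- ===== PORT B =====
-- pass 1 loop body: blocks.append([s]) on a '- path:' header, else blocks[-1].append(s)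
def pvB_blocksStep (blocks : List (List String)) (s : String) : List (List String) :=
  if PySem.Str.startswith s "- path:" then blocks ++ [[s]]
  else if blocks.isEmpty then blocks
  else blocks.dropLast ++ [blocks.getLast! ++ [s]]

def pvB_path (block : List String) : String :=
  PySem.Str.strip (((PySem.Str.splitMax? (block.headD "") ":" 1).getD []).getD 1 "")

-- inner loop body of pass 2: add key/value from a block body line
def pvB_entryStep (entry : PySem.Dict String String) (s : String) : PySem.Dict String String :=
  if !(s == "") && !(PySem.Str.startswith s "- ") && PySem.Str.isIn ":" s then
    let parts := (PySem.Str.splitMax? s ":" 1).getD []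
    entry.insert (PySem.Str.strip (parts.getD 0 "")) (PySem.Str.strip (parts.getD 1 ""))
  else entry

def pvB_entry (block : List String) : PySem.Dict String String :=
  (block.drop 1).foldl pvB_entryStep (PySem.Dict.empty.insert "path" (pvB_path block))

-- pass 2 loop body: targets[path] = entry
def pvB_dictStep (t : PySem.Dict String (PySem.Dict String String)) (block : List String) :
    PySem.Dict String (PySem.Dict String String) :=
  t.insert (pvB_path block) (pvB_entry block)

def parse_manifest_targets_alt (text : String) : List (String × List (String × String)) :=
  let stripped := (PySem.Str.splitlines text).map PySem.Str.strip
  let blocks := stripped.foldl pvB_blocksStep []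
  let targets := blocks.foldl pvB_dictStep PySem.Dict.empty
  targets.items.map (fun kv => (kv.1, kv.2.items))

-- ===== PRECONDITION & SPEC =====
def Spec_parse_manifest_targets (text : String) (out : List (String × List (String × String))) : Prop := out = parse_manifest_targets_alt text
instance (text : String) (out : List (String × List (String × String))) : Decidable (Spec_parse_manifest_targets text out) := by unfold Spec_parse_manifest_targets; infer_instance

-- ===== CLAIM (what is proved, stated in full; the proofs are below) =====
def Claim_equal_parse_manifest_targets : Prop := ∀ (text : String), Dom_parse_manifest_targets text → Spec_parse_manifest_targets text (parse_manifest_targets text)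

-- ===== LEMMAS AND PROOFS =====

-- `strip (rstrip s) = strip s` (A strips in two steps, B in one)
theorem pv_dropWhile_rdropWhile_comm {α : Type} (p : α → Bool) (l : List α) :
    List.dropWhile p (List.rdropWhile p l) = List.rdropWhile p (List.dropWhile p l) := by
  by_cases hall : ∀ x ∈ l, p x
  · rw [List.rdropWhile_eq_nil_iff.mpr hall, List.dropWhile_eq_nil_iff.mpr hall]
    simp
  · have hdecomp : l = l.takeWhile p ++ l.dropWhile p := (List.takeWhile_append_dropWhile).symm
    have hm : l.dropWhile p ≠ [] := by
      intro h; exact hall (List.dropWhile_eq_nil_iff.mp h)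
    obtain ⟨h, t, hht⟩ := List.exists_cons_of_ne_nil hm
    have hph : ¬ p h = true := by
      have := List.head_dropWhile_not p hm
      simpa [hht] using this
    have hr : List.rdropWhile p (l.dropWhile p) ≠ [] := by
      intro heq
      exact hph (List.rdropWhile_eq_nil_iff.mp heq h (by simp [hht]))
    obtain ⟨h', t', hht'⟩ := List.exists_cons_of_ne_nil hr
    have hh' : h' = h := by
      obtain ⟨s, hs⟩ := List.rdropWhile_prefix p (l.dropWhile p)
      rw [hht', hht] at hs
      simp at hs
      exact hs.1
    have happ : List.rdropWhile p l = l.takeWhile p ++ (h' :: t') := by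
      conv_lhs => rw [hdecomp]
      rw [List.rdropWhile, List.reverse_append, List.dropWhile_append]
      have h2 : List.dropWhile p (l.dropWhile p).reverse = (h' :: t').reverse := by
        rw [← hht']; simp [List.rdropWhile]
      rw [h2]
      simp
    rw [happ, List.dropWhile_append]
    have ht : List.dropWhile p (l.takeWhile p) = [] :=
      List.dropWhile_eq_nil_iff.mpr (fun x hx => List.mem_takeWhile_imp hx)
    rw [ht, hht']
    simp [hh', hph]

set_option maxHeartbeats 1000000 in
theorem pv_strip_rstrip (s : String) : PySem.Str.strip (PySem.Str.rstrip s) = PySem.Str.strip s := by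
  simp only [PySem.Str.strip, PySem.Str.rstrip, PySem.Chars.strip, PySem.Chars.rstrip, PySem.Chars.lstrip]
  congr 1
  simp only [String.toList_ofList]
  rw [show (List.dropWhile PySem.Chars.isspace s.toList.reverse).reverse
        = List.rdropWhile PySem.Chars.isspace s.toList from by simp [List.rdropWhile]]
  rw [pv_dropWhile_rdropWhile_comm]
  rw [show ∀ l : List Char, (List.dropWhile PySem.Chars.isspace l.reverse).reverse
        = List.rdropWhile PySem.Chars.isspace l from fun l => by simp [List.rdropWhile]]
  rw [show ∀ l : List Char, (List.dropWhile PySem.Chars.isspace l.reverse).reverse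
        = List.rdropWhile PySem.Chars.isspace l from fun l => by simp [List.rdropWhile]]
  exact List.rdropWhile_idempotent _ _

-- A's step as a function of the ALREADY-STRIPPED line
def pvStepS (st : PySem.Dict String (PySem.Dict String String) × Option String)
    (stripped : String) : PySem.Dict String (PySem.Dict String String) × Option String :=
  if PySem.Str.startswith stripped "- path:" then
    let path := PySem.Str.strip ((((PySem.Str.splitMax? stripped ":" 1).getD []).getD 1 ""))
    (st.1.insert path (PySem.Dict.empty.insert "path" path), some path)
  else if st.2.isNone || stripped == "" || PySem.Str.startswith stripped "- " then
    st
  else if PySem.Str.isIn ":" stripped then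
    match st.2 with
    | some p =>
        let parts := (PySem.Str.splitMax? stripped ":" 1).getD []
        (st.1.modify p PySem.Dict.empty
          (fun cur => cur.insert (PySem.Str.strip (parts.getD 0 "")) (PySem.Str.strip (parts.getD 1 ""))),
         st.2)
    | none => st
  else st

theorem pvA_step_eq (st : PySem.Dict String (PySem.Dict String String) × Option String)
    (raw : String) : pvA_step st raw = pvStepS st (PySem.Str.strip raw) := by
  show pvStepS st (PySem.Str.strip (PySem.Str.rstrip raw)) = _
  rw [pv_strip_rstrip]

-- abbreviations used by the invariant
def pvHdr (s : String) : Bool := PySem.Str.startswith s "- path:"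

def pvInit (s : String) : PySem.Dict String String :=
  PySem.Dict.empty.insert "path" (pvB_path [s])

-- A's result, computed block-wise with the pending block's (path, entry) kept aside
def pvF (t : PySem.Dict String (PySem.Dict String String)) (p : String)
    (d : PySem.Dict String String) : List String → PySem.Dict String (PySem.Dict String String)
  | [] => t.insert p d
  | s :: r =>
      if pvHdr s then pvF (t.insert p d) (pvB_path [s]) (pvInit s) r
      else pvF t p (pvB_entryStep d s) r

theorem pv_stepS_nonhdr (t : PySem.Dict String (PySem.Dict String String)) (p : String)
    (d : PySem.Dict String String) (s : String) (hs : pvHdr s = false) :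
    pvStepS (t.insert p d, some p) s = (t.insert p (pvB_entryStep d s), some p) := by
  unfold pvStepS pvB_entryStep pvHdr at *
  rw [hs]
  have hmod : ∀ (k v : String),
      (t.insert p d).modify p PySem.Dict.empty (fun cur => cur.insert k v)
        = t.insert p (d.insert k v) := by
    intro k v
    show (t.insert p d).insert p (((t.insert p d).getD p PySem.Dict.empty).insert k v) = _
    rw [PySem.Dict.getD_insert_self, PySem.Dict.insert_insert_self]
  simp only [Bool.false_eq_true, if_false, Option.isNone_some, Bool.false_or, hmod]
  by_cases he : (s == "") = true
  · simp only [he, Bool.true_or, if_true, Bool.not_true, Bool.false_and]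
    simp
  · rw [show (s == "") = false by simpa using he]
    by_cases hd : PySem.Str.startswith s "- " = true
    · simp only [hd, Bool.or_true, if_true, Bool.not_true, Bool.not_false,
        Bool.false_and, Bool.and_false]
      simp
    · rw [show PySem.Str.startswith s "- " = false by simpa using hd]
      by_cases hc : PySem.Str.isIn ":" s = true
      · simp only [hc, Bool.false_or, Bool.not_false, Bool.and_true, if_true]
        simp
      · rw [show PySem.Str.isIn ":" s = false by simpa using hc]
        simp

theorem pv_LA (ls : List String) (t : PySem.Dict String (PySem.Dict String String))
    (p : String) (d : PySem.Dict String String) :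
    (ls.foldl pvStepS (t.insert p d, some p)).1 = pvF t p d ls := by
  induction ls generalizing t p d with
  | nil => rfl
  | cons s r ih =>
      by_cases hs : pvHdr s = true
      · have hstep : pvStepS (t.insert p d, some p) s
            = ((t.insert p d).insert (pvB_path [s]) (pvInit s), some (pvB_path [s])) := by
          unfold pvStepS pvHdr at *
          rw [hs]
          rfl
        simp only [List.foldl_cons, hstep, pvF, hs, if_true]
        exact ih (t.insert p d) (pvB_path [s]) (pvInit s)
      · have hs' : pvHdr s = false := by simpa using hs
        simp only [List.foldl_cons, pv_stepS_nonhdr t p d s hs', pvF, hs', Bool.false_eq_true, if_false]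
        exact ih t p (pvB_entryStep d s)

theorem pv_getLast_bang_append {α : Type} [Inhabited α] (xs ys : List α) (h : ys ≠ []) :
    (xs ++ ys).getLast! = ys.getLast! := by
  obtain ⟨a, as, rfl⟩ := List.exists_cons_of_ne_nil h
  obtain ⟨y, hy⟩ : ∃ y, (a :: as).getLast? = some y :=
    Option.isSome_iff_exists.mp (by simp [List.getLast?_isSome])
  simp [List.getLast!_eq_getLast?_getD, List.getLast?_append, hy]

-- splitting lemma for B's pass-1 fold: a finished prefix of blocks is never touched again
theorem pv_blocks_split (ls : List String) (bs : List (List String)) (acc : List (List String))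
    (hacc : acc ≠ []) :
    ls.foldl pvB_blocksStep (bs ++ acc) = bs ++ ls.foldl pvB_blocksStep acc := by
  induction ls generalizing acc with
  | nil => rfl
  | cons s r ih =>
      simp only [List.foldl_cons]
      by_cases hs : pvHdr s = true
      · rw [show pvB_blocksStep (bs ++ acc) s = bs ++ (acc ++ [[s]]) by
          unfold pvB_blocksStep pvHdr at *; rw [hs]; simp,
          show pvB_blocksStep acc s = acc ++ [[s]] by
            unfold pvB_blocksStep pvHdr at *; rw [hs]; simp]
        exact ih (acc ++ [[s]]) (by simp)
      · have hs' : pvHdr s = false := by simpa using hs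
        have hne : (bs ++ acc).isEmpty = false := by simp [hacc]
        have hne' : acc.isEmpty = false := by simp [hacc]
        rw [show pvB_blocksStep (bs ++ acc) s = bs ++ (acc.dropLast ++ [acc.getLast! ++ [s]]) by
            unfold pvB_blocksStep pvHdr at *
            rw [hs', hne]
            simp only [Bool.false_eq_true, if_false]
            rw [List.dropLast_append, pv_getLast_bang_append bs acc hacc, hne']
            simp,
          show pvB_blocksStep acc s = acc.dropLast ++ [acc.getLast! ++ [s]] by
            unfold pvB_blocksStep pvHdr at *; rw [hs', hne']; simp]
        exact ih (acc.dropLast ++ [acc.getLast! ++ [s]]) (by simp)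

theorem pv_L1 (ls : List String) (t : PySem.Dict String (PySem.Dict String String))
    (h : String) (body : List String) :
    pvF t (pvB_path [h]) (body.foldl pvB_entryStep (pvInit h)) ls
      = (ls.foldl pvB_blocksStep [h :: body]).foldl pvB_dictStep t := by
  induction ls generalizing t h body with
  | nil =>
      simp only [List.foldl_nil, pvF, pvB_dictStep, List.foldl_cons]
      have hp : pvB_path (h :: body) = pvB_path [h] := rfl
      have he : pvB_entry (h :: body) = body.foldl pvB_entryStep (pvInit h) := by
        simp [pvB_entry, pvInit, pvB_path]
      rw [hp, he]
  | cons s r ih =>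
      simp only [List.foldl_cons]
      by_cases hs : pvHdr s = true
      · rw [show pvB_blocksStep [h :: body] s = [h :: body] ++ [[s]] by
          unfold pvB_blocksStep pvHdr at *; rw [hs]; simp]
        rw [pv_blocks_split r [h :: body] [[s]] (by simp)]
        simp only [pvF, hs, if_true, List.foldl_append, List.foldl_cons, List.foldl_nil]
        have : pvB_dictStep t (h :: body) = t.insert (pvB_path [h]) (body.foldl pvB_entryStep (pvInit h)) := by
          simp [pvB_dictStep, pvB_entry, pvInit, pvB_path]
        rw [this]
        exact ih (t.insert (pvB_path [h]) (body.foldl pvB_entryStep (pvInit h))) s []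
      · have hs' : pvHdr s = false := by simpa using hs
        rw [show pvB_blocksStep [h :: body] s = [h :: (body ++ [s])] by
          unfold pvB_blocksStep pvHdr at *; rw [hs']; simp [List.getLast!]]
        simp only [pvF, hs', Bool.false_eq_true, if_false]
        have : pvB_entryStep (body.foldl pvB_entryStep (pvInit h)) s
            = (body ++ [s]).foldl pvB_entryStep (pvInit h) := by simp
        rw [this]
        exact ih t h (body ++ [s])

theorem pv_L0 (ls : List String) :
    (ls.foldl pvStepS (PySem.Dict.empty, none)).1
      = (ls.foldl pvB_blocksStep []).foldl pvB_dictStep PySem.Dict.empty := by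
  induction ls with
  | nil => rfl
  | cons s r ih =>
      simp only [List.foldl_cons]
      by_cases hs : pvHdr s = true
      · rw [show pvStepS (PySem.Dict.empty, none) s
            = ((PySem.Dict.empty.insert (pvB_path [s]) (pvInit s)
                : PySem.Dict String (PySem.Dict String String)), some (pvB_path [s])) by
          unfold pvStepS pvHdr at *; rw [hs]; rfl]
        rw [show pvB_blocksStep [] s = [] ++ [[s]] by
          unfold pvB_blocksStep pvHdr at *; rw [hs]; simp]
        rw [pv_LA r PySem.Dict.empty (pvB_path [s]) (pvInit s)]
        have := pv_L1 r PySem.Dict.empty s []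
        simpa using this
      · have hs' : pvHdr s = false := by simpa using hs
        rw [show pvStepS (PySem.Dict.empty, none) s = (PySem.Dict.empty, none) by
          unfold pvStepS pvHdr at *; rw [hs']; rfl]
        rw [show pvB_blocksStep [] s = [] by
          unfold pvB_blocksStep pvHdr at *; rw [hs']; rfl]
        exact ih

-- ===== VERDICT (by name: the statement is the Claim_ definition above) =====
theorem parse_manifest_targets_spec : Claim_equal_parse_manifest_targets := by
  intro text _
  show parse_manifest_targets text = parse_manifest_targets_alt text
  have hstep : pvA_step = fun st r => pvStepS st (PySem.Str.strip r) :=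
    funext fun st => funext fun r => pvA_step_eq st r
  show ((PySem.Str.splitlines text).foldl pvA_step
        ((PySem.Dict.empty : PySem.Dict String (PySem.Dict String String)), (none : Option String))).1.items.map
          (fun kv => (kv.1, kv.2.items))
      = (((((PySem.Str.splitlines text).map PySem.Str.strip).foldl pvB_blocksStep []).foldl
            pvB_dictStep PySem.Dict.empty).items.map (fun kv => (kv.1, kv.2.items)))
  rw [hstep, show (PySem.Str.splitlines text).foldl (fun st r => pvStepS st (PySem.Str.strip r))
        ((PySem.Dict.empty : PySem.Dict String (PySem.Dict String String)), (none : Option String))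
      = ((PySem.Str.splitlines text).map PySem.Str.strip).foldl pvStepS
        (PySem.Dict.empty, none) from by rw [List.foldl_map]]
  rw [pv_L0]
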